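-- pv_equiv track=rewrite | github.com/raeez/chiral-bar-cobar | compute/lib/pva_deformation_cy3.py | _wedge_sign
-- ===== SOURCE A (Python) =====
-- from typing import Any, Dict, List, NamedTuple, Optional, Tuple
--
-- def _wedge_sign(sorted_I: List[int], sorted_J: List[int]) -> int:
--     """Sign of the permutation that interleaves sorted_I and sorted_J
--     into the standard sorted order of I union J.
--
--     If I and J overlap, returns 0 (but caller should check this).
--     """
--     merged = sorted_I + sorted_J
--     # Count inversions: number of pairs (a, b) with a from I, b from J, a > b
--     inversions = 0
--     for a in sorted_I:
--         for b in sorted_J: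
--             if a > b:
--                 inversions += 1
--     return (-1) ** inversions
-- ===== SOURCE B (Python) =====
-- def _wedge_sign(sorted_I, sorted_J):
--     # Two-pointer merge: sort both lists, then sweep once; inv counts pairs (a, b)
--     # with a from I, b from J, a > b (order-independent, so sorting is harmless).
--     xs = sorted(sorted_I)
--     ys = sorted(sorted_J)
--     m = len(ys)
--     inv = 0
--     j = 0
--     for a in xs:
--         while j < m and ys[j] < a:
--             j += 1
--         inv += j
--     return -1 if inv % 2 else 1
-- ===== Notes on version B (the rewrite author's own statement) =====
-- stated objective: faster
-- what changed: Replaces the nested O(n*m) pair count by sorting both lists and counting inversions with a single two-pointer sweep, returning -1/1 from the parity of the count.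
import Mathlib
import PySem

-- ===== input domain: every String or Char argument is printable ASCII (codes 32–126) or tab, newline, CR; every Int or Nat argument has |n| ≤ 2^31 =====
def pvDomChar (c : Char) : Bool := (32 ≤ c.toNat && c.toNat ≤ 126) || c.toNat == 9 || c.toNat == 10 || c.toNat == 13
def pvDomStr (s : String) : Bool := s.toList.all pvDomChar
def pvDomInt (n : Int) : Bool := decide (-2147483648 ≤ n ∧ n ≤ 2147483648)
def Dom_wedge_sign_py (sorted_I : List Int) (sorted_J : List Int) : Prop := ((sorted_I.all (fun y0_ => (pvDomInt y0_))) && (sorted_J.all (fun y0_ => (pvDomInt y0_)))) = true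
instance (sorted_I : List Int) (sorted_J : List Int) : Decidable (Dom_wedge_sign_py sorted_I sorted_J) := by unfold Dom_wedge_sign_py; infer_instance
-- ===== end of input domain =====

-- B replaces A's nested O(n*m) pair count by sorting both lists and a single
-- two-pointer sweep (objective: faster, asymptotic).

-- ===== PORT A =====
def wedge_sign_py (sorted_I : List Int) (sorted_J : List Int) : Int :=
  -- merged = sorted_I + sorted_J is computed and unused in A; omitted (no effect)
  let inversions : Nat :=
    sorted_I.foldl (fun acc a =>
      sorted_J.foldl (fun acc2 b => if a > b then acc2 + 1 else acc2) acc) 0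
  (-1 : Int) ^ inversions

-- ===== PORT B =====
-- the while loop: advance j while j < len(ys) and ys[j] < a
def pvAdvance (ys : List Int) (a : Int) (j : Nat) : Nat :=
  if h : j < ys.length then
    if ys[j] < a then pvAdvance ys a (j + 1) else j
  else j
termination_by ys.length - j

def wedge_sign_py_alt (sorted_I : List Int) (sorted_J : List Int) : Int :=
  let xs := PySem.List.sorted sorted_I (fun x => x) false
  let ys := PySem.List.sorted sorted_J (fun x => x) false
  let s := xs.foldl (fun (s : Nat × Nat) a =>
    let j := pvAdvance ys a s.2
    (s.1 + j, j)) (0, 0)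
  if s.1 % 2 ≠ 0 then -1 else 1

-- ===== PRECONDITION & SPEC =====
def Spec_wedge_sign_py (sorted_I : List Int) (sorted_J : List Int) (out : Int) : Prop := out = wedge_sign_py_alt sorted_I sorted_J
instance (sorted_I : List Int) (sorted_J : List Int) (out : Int) : Decidable (Spec_wedge_sign_py sorted_I sorted_J out) := by unfold Spec_wedge_sign_py; infer_instance

-- ===== CLAIM (what is proved, stated in full; the proofs are below) =====
def Claim_equal_wedge_sign_py : Prop := ∀ (sorted_I : List Int) (sorted_J : List Int), Dom_wedge_sign_py sorted_I sorted_J → Spec_wedge_sign_py sorted_I sorted_J (wedge_sign_py sorted_I sorted_J)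

-- ===== LEMMAS AND PROOFS =====

-- c a ys = how many elements of ys are < a
def pvC (a : Int) (ys : List Int) : Nat := ys.countP (fun b => decide (b < a))

-- A's inner loop adds pvC a J
theorem pvInnerA (J : List Int) (a : Int) : ∀ acc : Nat,
    J.foldl (fun acc2 b => if b < a then acc2 + 1 else acc2) acc = acc + pvC a J := by
  induction J with
  | nil => intro acc; simp [pvC]
  | cons b t ih =>
    intro acc
    simp only [List.foldl_cons, pvC, List.countP_cons]
    by_cases h : b < a
    · simp [h, ih, pvC]; omega
    · simp [h, ih, pvC]

theorem pvFoldAdd (f : Int → Nat) : ∀ (t : List Int) (acc : Nat),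
    t.foldl (fun acc a => acc + f a) acc = acc + (t.map f).sum := by
  intro t
  induction t with
  | nil => intro acc; simp
  | cons a t ih => intro acc; simp [ih]; omega

-- A's outer loop sums them
theorem pvOuterA (J : List Int) (I : List Int) (acc : Nat) :
    I.foldl (fun acc a =>
      J.foldl (fun acc2 b => if b < a then acc2 + 1 else acc2) acc) acc
      = acc + (I.map (fun a => pvC a J)).sum := by
  have hf : (fun (acc : Nat) (a : Int) =>
      J.foldl (fun acc2 b => if b < a then acc2 + 1 else acc2) acc)
      = fun acc a => acc + pvC a J := by
    funext acc a; exact pvInnerA J a acc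
  rw [hf, pvFoldAdd]

-- in a ≤-sorted list, position j holds an element < a iff j < pvC a ys
theorem pvSortedIdx (a : Int) : ∀ (ys : List Int), ys.Pairwise (· ≤ ·) →
    ∀ j (h : j < ys.length), (ys[j] < a ↔ j < pvC a ys) := by
  intro ys
  induction ys with
  | nil => intro _ j h; simp at h
  | cons y t ih =>
    intro hp j h
    have hy : ∀ x ∈ t, y ≤ x := (List.pairwise_cons.mp hp).1
    have ht : t.Pairwise (· ≤ ·) := (List.pairwise_cons.mp hp).2
    by_cases hya : y < a
    · cases j with
      | zero => simp [pvC, hya]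
      | succ n =>
        have hn : n < t.length := by simpa using h
        have hiff := ih ht n hn
        simp only [List.getElem_cons_succ, pvC, List.countP_cons, hya,
          decide_true, if_true] at hiff ⊢
        rw [hiff]; omega
    · have hz : pvC a (y :: t) = 0 := by
        simp only [pvC, List.countP_eq_zero]
        intro x hx
        rcases hx with _ | hx
        · simpa using hya
        · have : y ≤ x := hy x (by assumption)
          simp only [decide_eq_true_eq]; omega
      rw [hz]
      cases j with
      | zero => simpa using hya
      | succ n =>
        have hn : n < t.length := by simpa using h
        have : y ≤ t[n] := hy _ (List.getElem_mem hn)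
        simp only [List.getElem_cons_succ]
        constructor
        · intro hlt; omega
        · intro hlt; omega

-- the while loop lands exactly on pvC a ys, from any start point below it
theorem pvAdvanceEq (ys : List Int) (hs : ys.Pairwise (· ≤ ·)) (a : Int) :
    ∀ fuel j, pvC a ys - j ≤ fuel → j ≤ pvC a ys → pvAdvance ys a j = pvC a ys := by
  intro fuel
  induction fuel with
  | zero =>
    intro j h1 h2
    have hj : j = pvC a ys := by omega
    subst hj
    unfold pvAdvance
    split
    · rename_i h
      have := (pvSortedIdx a ys hs _ h).not.mpr (by omega)
      simp [this]
    · rfl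
  | succ n ih =>
    intro j h1 h2
    by_cases he : j = pvC a ys
    · subst he
      unfold pvAdvance
      split
      · rename_i h
        have := (pvSortedIdx a ys hs _ h).not.mpr (by omega)
        simp [this]
      · rfl
    · have hjl : j < pvC a ys := by omega
      have hlen : j < ys.length :=
        lt_of_lt_of_le hjl (List.countP_le_length)
      have hlt : ys[j] < a := (pvSortedIdx a ys hs j hlen).mpr hjl
      unfold pvAdvance
      rw [dif_pos hlen, if_pos hlt]
      exact ih (j + 1) (by omega) (by omega)

-- pvC is monotone in a
theorem pvCMono (ys : List Int) {a a' : Int} (h : a ≤ a') : pvC a ys ≤ pvC a' ys :=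
  List.countP_mono_left (fun x _ hx => by
    simp only [decide_eq_true_eq] at *; omega)

-- the two-pointer sweep accumulates the full sum
theorem pvSweep (ys : List Int) (hs : ys.Pairwise (· ≤ ·)) :
    ∀ (xs : List Int), xs.Pairwise (· ≤ ·) →
    ∀ (inv0 j0 : Nat), (∀ x ∈ xs, j0 ≤ pvC x ys) →
    (xs.foldl (fun (s : Nat × Nat) a =>
        let j := pvAdvance ys a s.2
        (s.1 + j, j)) (inv0, j0)).1
      = inv0 + (xs.map (fun a => pvC a ys)).sum := by
  intro xs
  induction xs with
  | nil => intro _ inv0 j0 _; simp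
  | cons a t ih =>
    intro hp inv0 j0 hj
    have hadv : pvAdvance ys a j0 = pvC a ys :=
      pvAdvanceEq ys hs a _ j0 (le_refl _) (hj a (List.mem_cons_self))
    have hat : ∀ x ∈ t, a ≤ x := (List.pairwise_cons.mp hp).1
    simp only [List.foldl_cons, hadv]
    rw [ih (List.pairwise_cons.mp hp).2 (inv0 + pvC a ys) (pvC a ys)
        (fun x hx => pvCMono ys (hat x hx))]
    simp; omega

theorem pvPow (n : Nat) : ((-1 : Int)) ^ n = if n % 2 ≠ 0 then -1 else 1 := by
  rcases Nat.even_or_odd n with h | h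
  · rw [h.neg_one_pow]
    simp [Nat.even_iff.mp h]
  · rw [h.neg_one_pow]
    simp [Nat.odd_iff.mp h]

-- ===== VERDICT (by name: the statement is the Claim_ definition above) =====
theorem wedge_sign_py_spec : Claim_equal_wedge_sign_py := by
  intro I J _
  simp only [Spec_wedge_sign_py, wedge_sign_py, wedge_sign_py_alt]
  set xs := PySem.List.sorted I (fun x => x) false with hxs
  set ys := PySem.List.sorted J (fun x => x) false with hys
  have hsx : xs.Pairwise (· ≤ ·) := PySem.List.sorted_pairwise I (fun x => x)
  have hsy : ys.Pairwise (· ≤ ·) := PySem.List.sorted_pairwise J (fun x => x)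
  have hsum : (xs.map (fun a => pvC a ys)).sum = (I.map (fun a => pvC a J)).sum := by
    have h1 : ∀ a, pvC a ys = pvC a J := fun a =>
      (PySem.List.sorted_perm J (fun x => x) false).countP_eq _
    calc (xs.map (fun a => pvC a ys)).sum
        = (xs.map (fun a => pvC a J)).sum := by simp only [h1]
      _ = (I.map (fun a => pvC a J)).sum :=
          ((PySem.List.sorted_perm I (fun x => x) false).map _).sum_eq
  rw [pvOuterA, pvSweep ys hsy xs hsx 0 0 (fun x _ => Nat.zero_le _), hsum, pvPow]
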